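-- pv_equiv track=rewrite | github.com/ltchang2019/music_generator | music.py | no_note_repeated_consecutively_more_than_eight_times
-- ===== SOURCE A (Python) =====
-- def no_note_repeated_consecutively_more_than_eight_times(compressed_and_stripped) -> bool:
--     i = 0
--     while i + 8 < len(compressed_and_stripped):
--         nine_note_slice = compressed_and_stripped[i:i+9]
--         if len(set(nine_note_slice)) == 1:
--             return False
--         i += 1
--
--     return True
-- ===== SOURCE B (Python) =====
-- def no_note_repeated_consecutively_more_than_eight_times(compressed_and_stripped) -> bool:
--     count = 0
--     prev = None
--     for note in compressed_and_stripped: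
--         if count > 0 and note == prev:
--             count += 1
--             if count >= 9:
--                 return False
--         else:
--             prev = note
--             count = 1
--     return True
-- ===== Notes on version B (the rewrite author's own statement) =====
-- stated objective: faster
-- what changed: Replaced the overlapping 9-element sliding-window set-size checks with a single pass maintaining a run-length counter of the current consecutive run, returning False as soon as a run reaches length 9.
import Mathlib
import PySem

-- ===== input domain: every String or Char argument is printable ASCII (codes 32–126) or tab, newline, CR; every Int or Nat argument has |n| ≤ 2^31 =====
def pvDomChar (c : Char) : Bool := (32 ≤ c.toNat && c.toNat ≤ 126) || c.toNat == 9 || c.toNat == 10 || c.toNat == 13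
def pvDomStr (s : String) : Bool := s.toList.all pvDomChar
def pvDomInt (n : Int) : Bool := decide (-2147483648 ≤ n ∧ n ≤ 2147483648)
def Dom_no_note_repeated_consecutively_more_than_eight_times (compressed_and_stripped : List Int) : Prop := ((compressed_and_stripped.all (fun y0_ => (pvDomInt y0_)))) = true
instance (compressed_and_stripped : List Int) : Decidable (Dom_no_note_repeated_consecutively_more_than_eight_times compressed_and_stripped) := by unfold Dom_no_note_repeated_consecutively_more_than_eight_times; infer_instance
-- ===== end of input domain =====

-- B replaces A's overlapping 9-element sliding-window set checks by a single pass
-- with a run-length counter (objective: simpler, one pass with O(1) state).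

-- ===== PORT A =====
-- the while loop: state i, condition i + 8 < len, slice xs[i:i+9], set-size test
def pvALoop (xs : List Int) (i : Nat) : Bool :=
  if h : i + 8 < xs.length then
    let nine_note_slice := PySem.List.slice xs (some (i : Int)) (some ((i : Int) + 9))
    if (PySem.Set.ofList nine_note_slice).length = 1 then false
    else pvALoop xs (i + 1)
  else true
termination_by xs.length - i

def no_note_repeated_consecutively_more_than_eight_times (compressed_and_stripped : List Int) : Bool :=
  pvALoop compressed_and_stripped 0

-- ===== PORT B =====
-- the for loop of Source B: state (prev, count); count = 0 encodes "prev not yet set"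
def pvBLoop : List Int → Int → Int → Bool
  | [], _, _ => true
  | note :: rest, prev, count =>
    if count > 0 && note == prev then
      if count + 1 ≥ 9 then false else pvBLoop rest prev (count + 1)
    else pvBLoop rest note 1

def no_note_repeated_consecutively_more_than_eight_times_alt (compressed_and_stripped : List Int) : Bool :=
  pvBLoop compressed_and_stripped 0 0

-- ===== PRECONDITION & SPEC =====
def Spec_no_note_repeated_consecutively_more_than_eight_times (compressed_and_stripped : List Int) (out : Bool) : Prop := out = no_note_repeated_consecutively_more_than_eight_times_alt compressed_and_stripped
instance (compressed_and_stripped : List Int) (out : Bool) : Decidable (Spec_no_note_repeated_consecutively_more_than_eight_times compressed_and_stripped out) := by unfold Spec_no_note_repeated_consecutively_more_than_eight_times; infer_instance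

-- ===== CLAIM (what is proved, stated in full; the proofs are below) =====
def Claim_equal_no_note_repeated_consecutively_more_than_eight_times : Prop := ∀ (compressed_and_stripped : List Int), Dom_no_note_repeated_consecutively_more_than_eight_times compressed_and_stripped → Spec_no_note_repeated_consecutively_more_than_eight_times compressed_and_stripped (no_note_repeated_consecutively_more_than_eight_times compressed_and_stripped)

-- ===== LEMMAS AND PROOFS =====

-- A's loop viewed as structural recursion on the suffix xs.drop i
def pvASuf (ys : List Int) : Bool :=
  if _h : 8 < ys.length then
    (if (PySem.Set.ofList (ys.take 9)).length = 1 then false else pvASuf ys.tail)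
  else true
termination_by ys.length
decreasing_by cases ys with
  | nil => simp at _h
  | cons a t => simp

-- set(ys) for a constant list is the singleton
theorem pv_foldl_add_const (p : Int) :
    ∀ (ys : List Int), (∀ y ∈ ys, y = p) → ys.foldl PySem.Set.add [p] = [p] := by
  intro ys
  induction ys with
  | nil => intro _; rfl
  | cons a t ih =>
    intro hall
    have ha : a = p := hall a (by simp)
    have : PySem.Set.add [p] a = [p] := by
      subst ha; simp [PySem.Set.add, PySem.Set.contains]
    simp only [List.foldl_cons, this]
    exact ih (fun y hy => hall y (by simp [hy]))

theorem pv_set_const (p : Int) (ys : List Int) (hne : ys ≠ []) (hall : ∀ y ∈ ys, y = p) :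
    PySem.Set.ofList ys = [p] := by
  cases ys with
  | nil => exact absurd rfl hne
  | cons a t =>
    have ha : a = p := hall a (by simp)
    rw [ha]
    have : PySem.Set.ofList (p :: t) = t.foldl PySem.Set.add [p] := by
      simp [PySem.Set.ofList_eq_foldl, PySem.Set.add, PySem.Set.contains]
    rw [this]
    exact pv_foldl_add_const p t (fun y hy => hall y (by simp [hy]))

-- two distinct members force set size ≠ 1
theorem pv_set_two (p x : Int) (ys : List Int) (hp : p ∈ ys) (hx : x ∈ ys) (hne : p ≠ x) :
    (PySem.Set.ofList ys).length ≠ 1 := by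
  intro hlen
  obtain ⟨a, ha⟩ := List.length_eq_one_iff.mp hlen
  have h1 : p ∈ PySem.Set.ofList ys := (PySem.Set.mem_ofList _ _).mpr hp
  have h2 : x ∈ PySem.Set.ofList ys := (PySem.Set.mem_ofList _ _).mpr hx
  rw [ha] at h1 h2
  simp at h1 h2
  exact hne (h1.trans h2.symm)

-- A's index loop equals the suffix recursion
theorem pv_aLoop_eq_suf (xs : List Int) : ∀ i, pvALoop xs i = pvASuf (xs.drop i) := by
  intro i
  induction hfuel : xs.length - i using Nat.strong_induction_on generalizing i with
  | _ n ih =>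
    rw [pvALoop, pvASuf]
    by_cases h : i + 8 < xs.length
    · have hd : 8 < (xs.drop i).length := by simp [List.length_drop]; omega
      have hslice : PySem.List.slice xs (some (i : Int)) (some ((i : Int) + 9)) = (xs.drop i).take 9 := by
        have := PySem.List.slice_natCast_add (xs := xs) (j := i) (n := 9)
        simpa using this
      have htail : (xs.drop i).tail = xs.drop (i + 1) := by
        rw [← List.drop_drop]; simp
      rw [dif_pos h, dif_pos hd, hslice, htail]
      by_cases hc : (PySem.Set.ofList ((xs.drop i).take 9)).length = 1
      · simp [hc]
      · simp only [hc, if_false]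
        exact ih (xs.length - (i+1)) (by omega) (i+1) rfl
    · have hd : ¬ 8 < (xs.drop i).length := by simp [List.length_drop]; omega
      rw [dif_neg h, dif_neg hd]

-- crossing a boundary: a block of ≤ 8 p's before a different x never fires a window
theorem pv_suf_prefix (p x : Int) (rest : List Int) (hne : p ≠ x) :
    ∀ c, c ≤ 8 → pvASuf (List.replicate c p ++ x :: rest) = pvASuf (x :: rest) := by
  intro c
  induction c with
  | zero => intro _; simp
  | succ k ih =>
    intro hc
    rw [pvASuf]
    by_cases h : 8 < (List.replicate (k+1) p ++ x :: rest).length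
    · have hxmem : x ∈ (List.replicate (k+1) p ++ x :: rest).take 9 := by
        rw [List.take_append]
        apply List.mem_append_right
        rcases Nat.exists_eq_succ_of_ne_zero
          (by simp; omega : 9 - (List.replicate (k+1) p).length ≠ 0) with ⟨m, hm⟩
        rw [hm]
        simp [List.take_succ_cons]
      have hpmem : p ∈ (List.replicate (k+1) p ++ x :: rest).take 9 := by
        have : (List.replicate (k+1) p ++ x :: rest).take 9 = p :: ((List.replicate k p ++ x :: rest).take 8) := by
          simp [List.replicate_succ]
        rw [this]; simp
      have hns : (PySem.Set.ofList ((List.replicate (k+1) p ++ x :: rest).take 9)).length ≠ 1 :=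
        pv_set_two p x _ hpmem hxmem hne
      have htail : (List.replicate (k+1) p ++ x :: rest).tail = List.replicate k p ++ x :: rest := by
        simp [List.replicate_succ]
      rw [dif_pos h, if_neg hns, htail]
      exact ih (by omega)
    · have h2 : ¬ 8 < (x :: rest).length := by
        simp at h ⊢; omega
      rw [dif_neg h, pvASuf, dif_neg h2]

-- B's loop with a live run of length c equals A's suffix recursion on (p^c ++ xs)
theorem pv_bLoop_eq_suf :
    ∀ (xs : List Int) (p : Int) (c : Nat), 1 ≤ c → c ≤ 8 →
      pvBLoop xs p (c : Int) = pvASuf (List.replicate c p ++ xs) := by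
  intro xs
  induction xs with
  | nil =>
    intro p c h1 h8
    rw [pvBLoop, pvASuf]
    have : ¬ 8 < (List.replicate c p ++ ([] : List Int)).length := by simp; omega
    rw [dif_neg this]
  | cons note rest ih =>
    intro p c h1 h8
    by_cases heq : note = p
    · subst heq
      have hcpos : ((c : Int) > 0 && note == note) = true := by simp; omega
      rw [pvBLoop, if_pos hcpos]
      by_cases h9 : (c : Int) + 1 ≥ 9
      · have hc8 : c = 8 := by omega
        subst hc8
        rw [if_pos h9, pvASuf]
        have hlen : 8 < (List.replicate 8 note ++ note :: rest).length := by simp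
        have hwin : (List.replicate 8 note ++ note :: rest).take 9 = List.replicate 9 note := by
          have : List.replicate 8 note ++ note :: rest = List.replicate 9 note ++ rest := by
            simp [List.replicate_succ']
          rw [this, List.take_append]
          simp
        have hset : (PySem.Set.ofList ((List.replicate 8 note ++ note :: rest).take 9)).length = 1 := by
          rw [hwin, pv_set_const note _ (by simp) (by intro y hy; simpa using (List.eq_of_mem_replicate hy))]
          rfl
        rw [dif_pos hlen, if_pos hset]
      · have h9' : ¬ ((c : Int) + 1 ≥ 9) := h9
        rw [if_neg h9']
        have hstep : (c : Int) + 1 = ((c + 1 : Nat) : Int) := by push_cast; ring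
        rw [hstep, ih note (c+1) (by omega) (by omega)]
        congr 1
        rw [List.replicate_succ']
        simp
    · have hcond : (((c : Int) > 0 && note == p)) = false := by
        simp [heq]
      rw [pvBLoop, hcond]
      simp only [Bool.false_eq_true, if_false]
      have := ih note 1 (by omega) (by omega)
      simp only [Int.natCast_one] at this
      rw [this]
      simp only [List.replicate_one, List.singleton_append]
      exact (pv_suf_prefix p note rest (fun h => heq h.symm) c h8).symm

-- ===== VERDICT (by name: the statement is the Claim_ definition above) =====
theorem no_note_repeated_consecutively_more_than_eight_times_spec : Claim_equal_no_note_repeated_consecutively_more_than_eight_times := by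
  intro xs _
  unfold Spec_no_note_repeated_consecutively_more_than_eight_times
  unfold no_note_repeated_consecutively_more_than_eight_times no_note_repeated_consecutively_more_than_eight_times_alt
  rw [pv_aLoop_eq_suf xs 0, List.drop_zero]
  cases xs with
  | nil => rw [pvBLoop, pvASuf]; simp
  | cons h t =>
    rw [pvBLoop]
    have : ((0 : Int) > 0 && h == (0 : Int)) = false := by simp
    rw [this]
    simp only [Bool.false_eq_true, if_false]
    have := pv_bLoop_eq_suf t h 1 (by omega) (by omega)
    simp only [Int.natCast_one] at this
    rw [this]
    simp
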